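-- pv_equiv track=rewrite | github.com/CharanRayudu/SentryAI | apps/worker/evals/dojo/scenarios/base.py | count_retries
-- ===== SOURCE A (Python) =====
-- from typing import List, Dict, Any, Optional, Callable
--
-- def count_retries(logs: List[str]) -> int:
--     """Count how many times the agent retried the same action"""
--     # Simple heuristic: count similar consecutive actions
--     if len(logs) < 2:
--         return 0
--
--     retries = 0
--     last_action = None
--
--     for log in logs:
--         # Extract action from log (simplified)
--         action = log[:50]  # First 50 chars as action signature
--
--         if action == last_action:
--             retries += 1
--         else:
--             last_action = action
--
--     return retries
-- ===== SOURCE B (Python) =====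
-- def count_retries(logs):
--     """Count how many times the agent retried the same action"""
--     prefixes = [l[:50] for l in logs]
--     n = len(prefixes)
--     # count maximal runs of equal consecutive prefixes; each run of length k
--     # contributes k-1 retries, so the answer is n - number_of_runs
--     runs = 0
--     i = 0
--     while i < n:
--         j = i + 1
--         while j < n and prefixes[j] == prefixes[i]:
--             j += 1
--         runs += 1
--         i = j
--     return n - runs
-- ===== Notes on version B (the rewrite author's own statement) =====
-- stated objective: alternative
-- what changed: Instead of A's single pass with a last_action accumulator incrementing on each adjacent match, B scans the prefix list run by run with a nested while loop, counts the number of maximal runs of equal consecutive prefixes, and returns len(logs) - runs (each run of length k contributes k-1 retries).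
import Mathlib
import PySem

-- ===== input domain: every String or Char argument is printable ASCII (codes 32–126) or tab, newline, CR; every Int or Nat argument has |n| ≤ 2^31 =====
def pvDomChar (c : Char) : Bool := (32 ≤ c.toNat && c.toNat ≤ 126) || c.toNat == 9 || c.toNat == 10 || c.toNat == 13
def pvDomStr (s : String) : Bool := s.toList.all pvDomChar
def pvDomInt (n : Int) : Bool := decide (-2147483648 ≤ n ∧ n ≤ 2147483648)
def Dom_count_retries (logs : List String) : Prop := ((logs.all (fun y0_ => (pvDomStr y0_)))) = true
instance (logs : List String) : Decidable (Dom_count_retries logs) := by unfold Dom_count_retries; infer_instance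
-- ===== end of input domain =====

-- B counts maximal runs of equal consecutive 50-char prefixes (nested run-scanning loop)
-- and returns len(logs) - runs, instead of A's single pass with a last_action accumulator; same O(n) cost.

-- ===== PORT A =====
-- one loop step of A: state = (retries, last_action)
def countRetriesStepA (st : Int × Option String) (log : String) : Int × Option String :=
  let action := PySem.Str.slice log none (some 50)
  if st.2 = some action then (st.1 + 1, st.2) else (st.1, some action)

def count_retries (logs : List String) : Int :=
  if logs.length < 2 then 0
  else (logs.foldl countRetriesStepA (0, none)).1

-- ===== PORT B =====
-- inner while loop of B: length of the leading run of elements equal to p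
def runLen (p : String) : List String → Nat
  | [] => 0
  | q :: t => if q == p then 1 + runLen p t else 0

-- outer while loop of B: number of maximal runs of equal consecutive elements
def numRuns : List String → Int
  | [] => 0
  | p :: rest => 1 + numRuns (rest.drop (runLen p rest))
termination_by ps => ps.length
decreasing_by
  have := List.length_drop (l := rest) (i := runLen p rest)
  simp only [List.length_cons]
  omega

def count_retries_alt (logs : List String) : Int :=
  let prefixes := logs.map (fun l => PySem.Str.slice l none (some 50))
  (prefixes.length : Int) - numRuns prefixes

-- ===== PRECONDITION & SPEC =====
def Spec_count_retries (logs : List String) (out : Int) : Prop := out = count_retries_alt logs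
instance (logs : List String) (out : Int) : Decidable (Spec_count_retries logs out) := by unfold Spec_count_retries; infer_instance

-- ===== CLAIM (what is proved, stated in full; the proofs are below) =====
def Claim_equal_count_retries : Prop := ∀ (logs : List String), Dom_count_retries logs → Spec_count_retries logs (count_retries logs)

-- ===== LEMMAS AND PROOFS =====

-- remainder of the prefix list after skipping the run matching the current last action
def afterRun (p : String) (ps : List String) : Int := numRuns (ps.drop (runLen p ps))

-- loop invariant: A's fold from (r, some p) over logs equals
-- r + |logs| - (number of runs of the prefixes of logs, counting a leading run of p as merged)
theorem countRetries_loop (logs : List String) :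
    ∀ (r : Int) (p : String),
      (logs.foldl countRetriesStepA (r, some p)).1 =
      r + logs.length - afterRun p (logs.map (fun l => PySem.Str.slice l none (some 50))) := by
  induction logs with
  | nil => intro r p; simp [afterRun, numRuns, runLen]
  | cons a t ih =>
    intro r p
    rw [List.foldl_cons]
    by_cases h : p = PySem.Str.slice a none (some 50)
    · have hs : countRetriesStepA (r, some p) a = (r + 1, some p) := by
        simp [countRetriesStepA, h]
      rw [hs, ih]
      have hb : (PySem.Str.slice a none (some 50) == p) = true := by simp [h]
      simp only [afterRun, List.map_cons, runLen, hb, if_pos, List.length_cons]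
      rw [Nat.add_comm 1, List.drop_succ_cons]
      push_cast; ring
    · have hs : countRetriesStepA (r, some p) a =
          (r, some (PySem.Str.slice a none (some 50))) := by
        simp [countRetriesStepA, h]
      rw [hs, ih]
      have hb : (PySem.Str.slice a none (some 50) == p) = false := by
        simp [BEq.beq]; exact fun hh => h hh.symm
      simp only [afterRun, List.map_cons, runLen, hb, List.length_cons]
      rw [if_neg (by simp)]
      rw [List.drop_zero, numRuns]
      push_cast; ring

theorem count_retries_spec : Claim_equal_count_retries := by
  unfold Claim_equal_count_retries
  intro logs _
  unfold Spec_count_retries count_retries count_retries_alt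
  match logs with
  | [] => simp [numRuns]
  | [x] => simp [numRuns, runLen]
  | x :: y :: t =>
    rw [if_neg (by simp)]
    have h1 : List.foldl countRetriesStepA ((0 : Int), (none : Option String)) (x :: y :: t)
        = List.foldl countRetriesStepA ((0 : Int), some (PySem.Str.slice x none (some 50))) (y :: t) := by
      rw [List.foldl_cons]; simp [countRetriesStepA]
    rw [h1, countRetries_loop]
    simp only [List.map_cons, List.length_map, List.length_cons]
    rw [numRuns]
    unfold afterRun
    push_cast; ring
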